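-- pv_equiv track=rewrite | github.com/jeronimopenha/kmeans_oc | util.py | create_reduce_tree
-- ===== SOURCE A (Python) =====
-- def create_reduce_tree(n: int):
--     n_st = 0
--     dict_idx = 0
--     final_dict = {}
--     queue = []
--     for i in range(n):
--         queue.append(i)
--
--     while len(queue) > 1:
--         queue_tmp = queue.copy()
--         queue.clear()
--         while queue_tmp:
--             a = queue_tmp.pop(0)
--             b = None
--             if queue_tmp:
--                 b = queue_tmp.pop(0)
--
--             if b is None:
--                 final_dict[dict_idx] = [n_st, a]
--             else:
--                 final_dict[dict_idx] = [n_st, a, b]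
--             queue.append(dict_idx)
--             dict_idx += 1
--         n_st += 1
--     return final_dict, n_st
-- ===== SOURCE B (Python) =====
-- def create_reduce_tree(n: int):
--     # Queue-free version: each level's node ids form a contiguous block,
--     # so children are computed arithmetically from the block start.
--     final_dict = {}
--     n_st = 0
--     start = 0      # first id of the current level
--     count = n      # number of nodes in the current level
--     idx = 0        # next dict index
--     while count > 1:
--         base = idx
--         for j in range((count + 1) // 2):
--             a = start + 2 * j
--             if 2 * j + 1 < count:
--                 final_dict[idx] = [n_st, a, a + 1]
--             else:
--                 final_dict[idx] = [n_st, a]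
--             idx += 1
--         start = base
--         count = (count + 1) // 2
--         n_st += 1
--     return final_dict, n_st
-- ===== Notes on version B (the rewrite author's own statement) =====
-- stated objective: simpler
-- what changed: B drops A's queue lists (copied, cleared and popped with O(n) pop(0) each level) and instead keeps three integers - the level's first node id, its node count and the next dict index - deriving each node's children arithmetically as start+2j, start+2j+1.
import Mathlib
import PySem

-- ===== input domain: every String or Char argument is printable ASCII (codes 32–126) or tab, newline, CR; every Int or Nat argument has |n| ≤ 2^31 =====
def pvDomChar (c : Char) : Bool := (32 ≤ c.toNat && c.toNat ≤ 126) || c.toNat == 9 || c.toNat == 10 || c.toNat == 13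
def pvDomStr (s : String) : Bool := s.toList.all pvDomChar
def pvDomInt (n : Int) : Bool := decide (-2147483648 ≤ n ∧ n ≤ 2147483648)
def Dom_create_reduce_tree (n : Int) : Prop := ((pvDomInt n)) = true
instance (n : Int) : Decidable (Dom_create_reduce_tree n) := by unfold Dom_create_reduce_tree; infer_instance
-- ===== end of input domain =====

-- B replaces A's explicit queue lists (copied, cleared and popped each level) by three
-- integers — the current level's first node id, its node count and the next dict index —
-- computing each node's children arithmetically. Objective: simpler (and no quadratic pop(0)).

-- ===== PORT A =====
-- inner 'while queue_tmp' loop: pops one or two ids, records the dict entry, collects the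
-- new queue; returns (final_dict, new queue, dict_idx)
def innerA : List Int → Int → Int → PySem.Dict Int (List Int) →
    PySem.Dict Int (List Int) × List Int × Int
  | [], _, d, fd => (fd, [], d)
  | [a], nst, d, fd => (fd.insert d [nst, a], [d], d + 1)
  | a :: b :: rest, nst, d, fd =>
      let fd' := fd.insert d [nst, a, b]
      let r := innerA rest nst (d + 1) fd'
      (r.1, d :: r.2.1, r.2.2)

theorem innerA_len (qt : List Int) : ∀ (nst d : Int) (fd : PySem.Dict Int (List Int)),
    ((innerA qt nst d fd).2.1).length = (qt.length + 1) / 2 := by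
  match qt with
  | [] => intro nst d fd; simp [innerA]
  | [a] => intro nst d fd; simp [innerA]
  | a :: b :: rest =>
      intro nst d fd
      simp [innerA, innerA_len rest]
      omega

-- outer 'while len(queue) > 1' loop
def outerA (queue : List Int) (nst d : Int) (fd : PySem.Dict Int (List Int)) :
    PySem.Dict Int (List Int) × Int :=
  if h : queue.length > 1 then
    let r := innerA queue nst d fd
    outerA r.2.1 (nst + 1) r.2.2 r.1
  else (fd, nst)
termination_by queue.length
decreasing_by
  have := innerA_len queue nst d fd
  omega

def create_reduce_tree (n : Int) : (List (Int × List Int)) × Int :=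
  let queue := (PySem.List.pyRange 0 n 1).foldl (fun q i => q ++ [i]) []
  let r := outerA queue 0 0 PySem.Dict.empty
  (r.1.items, r.2)

-- ===== PORT B =====
-- body of B's 'for j in range((count+1)//2)' loop; state is (final_dict, idx)
def stepB (start m nst : Int) (st : PySem.Dict Int (List Int) × Int) (j : Int) :
    PySem.Dict Int (List Int) × Int :=
  let a := start + 2 * j
  if 2 * j + 1 < m then (st.1.insert st.2 [nst, a, a + 1], st.2 + 1)
  else (st.1.insert st.2 [nst, a], st.2 + 1)

-- B's 'while count > 1' loop over (start, count, idx, n_st)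
def outerB (start m idx nst : Int) (fd : PySem.Dict Int (List Int)) :
    PySem.Dict Int (List Int) × Int :=
  if h : m > 1 then
    let k := PySem.Int.floordiv (m + 1) 2
    let r := (PySem.List.pyRange 0 k 1).foldl (stepB start m nst) (fd, idx)
    outerB idx k r.2 (nst + 1) r.1
  else (fd, nst)
termination_by m.toNat
decreasing_by
  rw [PySem.Int.floordiv_eq_ediv_of_pos (by omega)]
  omega

def create_reduce_tree_alt (n : Int) : (List (Int × List Int)) × Int :=
  let r := outerB 0 n 0 0 PySem.Dict.empty
  (r.1.items, r.2)

-- ===== PRECONDITION & SPEC =====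
def Spec_create_reduce_tree (n : Int) (out : (List (Int × List Int)) × Int) : Prop := out = create_reduce_tree_alt n
instance (n : Int) (out : (List (Int × List Int)) × Int) : Decidable (Spec_create_reduce_tree n out) := by unfold Spec_create_reduce_tree; infer_instance

-- ===== CLAIM (what is proved, stated in full; the proofs are below) =====
def Claim_equal_create_reduce_tree : Prop := ∀ (n : Int), Dom_create_reduce_tree n → Spec_create_reduce_tree n (create_reduce_tree n)

-- ===== LEMMAS AND PROOFS =====

-- [S, S+1, …, S+m-1]: the shape of every queue A builds (each level's ids are contiguous)
def contig (S : Int) : Nat → List Int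
  | 0 => []
  | m + 1 => S :: contig (S + 1) m

theorem contig_length (m : Nat) : ∀ (S : Int), (contig S m).length = m := by
  induction m with
  | zero => intro S; rfl
  | succ k ih => intro S; simp [contig, ih]

theorem map_range_eq_contig (m : Nat) : ∀ (S : Int),
    (List.range m).map (fun j : Nat => S + (j : Int)) = contig S m := by
  induction m with
  | zero => intro S; rfl
  | succ k ih =>
      intro S
      rw [List.range_succ_eq_map, List.map_cons, List.map_map]
      simp only [contig, Nat.cast_zero, add_zero]
      congr 1
      rw [← ih (S + 1)]
      apply List.map_congr_left
      intro j _
      simp only [Function.comp_apply]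
      push_cast
      ring

theorem stepB_shift (S M nst : Int) (st : PySem.Dict Int (List Int) × Int) (j : Int) :
    stepB S (M + 2) nst st (j + 1) = stepB (S + 2) M nst st j := by
  simp only [stepB]
  have ha : S + 2 * (j + 1) = S + 2 + 2 * j := by ring
  have hc : (2 * (j + 1) + 1 < M + 2) ↔ (2 * j + 1 < M) := by omega
  rw [ha]
  split_ifs with h1 h2 h2
  · simp [add_assoc]
  · exact absurd (hc.mp h1) h2
  · exact absurd (hc.mpr h2) h1
  · rfl

-- inner loop on a contiguous queue of m ids starting at S = B's for-loop over j
theorem inner_eq (m : Nat) : ∀ (S nst d : Int) (fd : PySem.Dict Int (List Int)),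
    innerA (contig S m) nst d fd =
      ((((List.range ((m + 1) / 2)).map (fun j : Nat => (j : Int))).foldl
          (stepB S (m : Int) nst) (fd, d)).1,
       contig d ((m + 1) / 2),
       (((List.range ((m + 1) / 2)).map (fun j : Nat => (j : Int))).foldl
          (stepB S (m : Int) nst) (fd, d)).2) ∧
    (((List.range ((m + 1) / 2)).map (fun j : Nat => (j : Int))).foldl
          (stepB S (m : Int) nst) (fd, d)).2 = d + ((m + 1) / 2 : Nat) := by
  induction m using Nat.strong_induction_on with
  | _ m ih =>
    match m with
    | 0 => intro S nst d fd; simp [innerA, contig]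
    | 1 =>
        intro S nst d fd
        simp [innerA, contig, List.range_succ, stepB]
    | Nat.succ (Nat.succ m') =>
        intro S nst d fd
        have hk : (m' + 2 + 1) / 2 = (m' + 1) / 2 + 1 := by omega
        have hcast : ((m' + 2 : Nat) : Int) = (m' : Int) + 2 := by push_cast; ring
        rw [hk, List.range_succ_eq_map]
        simp only [List.map_cons, List.map_map, List.foldl_cons]
        have hmap : ∀ (st : PySem.Dict Int (List Int) × Int),
            ((List.range ((m' + 1) / 2)).map ((fun j : Nat => (j : Int)) ∘ Nat.succ)).foldl
              (stepB S ((m' + 2 : Nat) : Int) nst) st =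
            ((List.range ((m' + 1) / 2)).map (fun j : Nat => (j : Int))).foldl
              (stepB (S + 2) (m' : Int) nst) st := by
          intro st
          rw [show ((List.range ((m' + 1) / 2)).map ((fun j : Nat => (j : Int)) ∘ Nat.succ)) =
              ((List.range ((m' + 1) / 2)).map (fun j : Nat => (j : Int))).map (fun x => x + 1) by
            simp [List.map_map]]
          rw [List.foldl_map]
          apply PySem.List.foldl_congr_mem
          intro acc x _
          rw [hcast, stepB_shift]
        have hstep0 : stepB S ((m' + 2 : Nat) : Int) nst (fd, d) ((0 : Nat) : Int) =
            (fd.insert d [nst, S, S + 1], d + 1) := by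
          rw [hcast]; simp only [stepB]
          rw [if_pos (by push_cast; omega)]
          norm_num
        have hcontig : contig S (m' + 2) = S :: (S + 1) :: contig (S + 2) m' := by
          simp [contig]; rw [show S + 1 + 1 = S + 2 by ring]
        rw [hcontig]
        simp only [innerA]
        have hrec := ih m' (by omega) (S + 2) nst (d + 1) (fd.insert d [nst, S, S + 1])
        rw [hmap, hstep0]
        refine ⟨?_, ?_⟩
        · rw [hrec.1]
          refine Prod.ext rfl (Prod.ext ?_ rfl)
          simp [contig]
        · rw [hrec.2]; push_cast; ring

theorem pyRange_zero_map (k : Nat) :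
    PySem.List.pyRange 0 (k : Int) 1 = (List.range k).map (fun j : Nat => (j : Int)) := by
  rw [PySem.List.pyRange_one]
  simp

-- outer loops agree on a contiguous queue
theorem outer_eq (m : Nat) : ∀ (S d nst : Int) (fd : PySem.Dict Int (List Int)),
    outerA (contig S m) nst d fd = outerB S (m : Int) d nst fd := by
  induction m using Nat.strong_induction_on with
  | _ m ih =>
    intro S d nst fd
    by_cases hm : m > 1
    · rw [outerA, outerB]
      rw [dif_pos (by rw [contig_length]; omega), dif_pos (by exact_mod_cast hm)]
      have hfd : PySem.Int.floordiv ((m : Int) + 1) 2 = (((m + 1) / 2 : Nat) : Int) := by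
        have := PySem.Int.floordiv_natCast (m + 1) 2
        push_cast at this ⊢
        exact this
      have hk := inner_eq m S nst d fd
      simp only [hfd, pyRange_zero_map, hk.1]
      rw [ih ((m + 1) / 2) (by omega) d (((List.range ((m + 1) / 2)).map (fun j : Nat => (j : Int))).foldl
          (stepB S (m : Int) nst) (fd, d)).2 (nst + 1)]
    · rw [outerA, outerB]
      rw [dif_neg (by rw [contig_length]; omega), dif_neg (by omega)]

-- ===== VERDICT (by name: the statement is the Claim_ definition above) =====
theorem create_reduce_tree_spec : Claim_equal_create_reduce_tree := by
  intro n _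
  unfold Spec_create_reduce_tree create_reduce_tree create_reduce_tree_alt
  rw [PySem.List.foldl_append_singleton_eq_self]
  dsimp only
  by_cases hn : 0 ≤ n
  · have h1 : PySem.List.pyRange 0 n 1 = contig 0 n.toNat := by
      rw [show n = ((n.toNat : Nat) : Int) by omega, pyRange_zero_map]
      simp only [Int.toNat_natCast]
      rw [← map_range_eq_contig n.toNat 0]
      apply List.map_congr_left
      intro j _
      ring
    rw [h1, List.nil_append]
    rw [outer_eq n.toNat 0 0 0 PySem.Dict.empty]
    rw [show ((n.toNat : Nat) : Int) = n by omega]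
  · have h1 : PySem.List.pyRange 0 n 1 = [] := PySem.List.pyRange_one_eq_nil (by omega)
    rw [h1, List.nil_append]
    rw [outerA, outerB, dif_neg (by simp), dif_neg (by omega)]
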